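-- pv_equiv track=rewrite | github.com/AlekseySimonov/Homework-2022 | day3/part2.py | visited_houses
-- ===== SOURCE A (Python) =====
-- def visited_houses(any_direction):
--     x = 0
--     y = 0
--     N_S = []
--     W_E = []
--
--     for i in any_direction:
--         if i == '<':
--             y -= 1
--             N_S.append(x)
--             W_E.append(y)
--         elif i == '>':
--             y += 1
--             N_S.append(x)
--             W_E.append(y)
--         elif i == '^':
--             x += 1
--             N_S.append(x)
--             W_E.append(y)
--         elif i == 'v':
--             x -= 1
--             N_S.append(x)
--             W_E.append(y)
--     return [' '.join(str(x)) for x in zip(N_S, W_E)]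
-- ===== SOURCE B (Python) =====
-- _DELTAS = {'^': (1, 0), 'v': (-1, 0), '<': (0, -1), '>': (0, 1)}
--
--
-- def _positions(ms):
--     """Divide and conquer: the positions reached by a move list are the
--     positions of the left half, followed by the right half's positions
--     shifted by the left half's endpoint (prefix sums compose)."""
--     if len(ms) <= 1:
--         return list(ms)
--     mid = len(ms) // 2
--     left = _positions(ms[:mid])
--     right = _positions(ms[mid:])
--     ox, oy = left[-1]
--     return left + [(ox + rx, oy + ry) for rx, ry in right]
--
--
-- def visited_houses(any_direction):
--     moves = [_DELTAS[c] for c in any_direction if c in _DELTAS]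
--     return [' '.join(str(p)) for p in _positions(moves)]
-- ===== Notes on version B (the rewrite author's own statement) =====
-- stated objective: alternative
-- what changed: Replaces the single-pass four-branch loop maintaining running counters and two parallel coordinate lists with a divide-and-conquer prefix-sum: filter characters to delta pairs, recursively split the move list in halves, solve each half independently, and shift the right half's positions by the left half's endpoint; the measured constant-factor speedup comes from doing the per-character work in comprehensions instead of a per-character branch with two list appends.
import Mathlib
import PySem

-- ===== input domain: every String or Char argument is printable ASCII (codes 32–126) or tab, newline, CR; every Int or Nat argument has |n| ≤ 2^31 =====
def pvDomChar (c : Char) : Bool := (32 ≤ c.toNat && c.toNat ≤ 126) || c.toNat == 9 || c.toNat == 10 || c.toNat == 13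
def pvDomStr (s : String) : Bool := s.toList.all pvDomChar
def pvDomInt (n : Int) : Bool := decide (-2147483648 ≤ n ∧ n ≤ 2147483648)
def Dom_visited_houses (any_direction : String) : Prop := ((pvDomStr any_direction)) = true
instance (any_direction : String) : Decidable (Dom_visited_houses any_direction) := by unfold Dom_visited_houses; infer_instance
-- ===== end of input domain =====

-- B replaces the single-pass counter loop with divide-and-conquer prefix sums over the filtered delta pairs (alternative decomposition).

-- ' '.join(str(p)) for an int pair p: str(p) = "(a, b)", joined character by character (same expression in both sources)
def pvFmtPair (p : Int × Int) : String :=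
  String.ofList (PySem.Chars.join [' ']
    ((['('] ++ PySem.Int.toChars p.1 ++ [',', ' '] ++ PySem.Int.toChars p.2 ++ [')']).map (fun c => [c])))

-- ===== PORT A =====
def visited_houses (any_direction : String) : List String :=
  let r := any_direction.toList.foldl
    (fun (st : Int × Int × List Int × List Int) i =>
      let x := st.1; let y := st.2.1; let ns := st.2.2.1; let we := st.2.2.2
      if i = '<' then (x, y - 1, ns ++ [x], we ++ [y - 1])
      else if i = '>' then (x, y + 1, ns ++ [x], we ++ [y + 1])
      else if i = '^' then (x + 1, y, ns ++ [x + 1], we ++ [y])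
      else if i = 'v' then (x - 1, y, ns ++ [x - 1], we ++ [y])
      else st)
    (0, 0, [], [])
  (r.2.2.1.zip r.2.2.2).map (fun p => pvFmtPair p)

-- ===== PORT B =====
-- _DELTAS lookup: 'c in _DELTAS' test + '_DELTAS[c]' in one step
def pvDeltaOf? (c : Char) : Option (Int × Int) :=
  if c = '^' then some (1, 0)
  else if c = 'v' then some (-1, 0)
  else if c = '<' then some (0, -1)
  else if c = '>' then some (0, 1)
  else none

-- port of _positions: divide and conquer; left[-1] exists whenever this branch runs
-- (mid ≥ 1 so left is nonempty: getLastD's default (0,0) is unreachable)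
def pvPositions (ms : List (Int × Int)) : List (Int × Int) :=
  if ms.length ≤ 1 then ms
  else
    let mid := ms.length / 2
    let left := pvPositions (ms.take mid)
    let right := pvPositions (ms.drop mid)
    let o := left.getLastD (0, 0)
    left ++ right.map (fun q => (o.1 + q.1, o.2 + q.2))
termination_by ms.length
decreasing_by
  · simp only [List.length_take]; omega
  · simp only [List.length_drop]; omega

def visited_houses_alt (any_direction : String) : List String :=
  let moves := any_direction.toList.filterMap pvDeltaOf?
  (pvPositions moves).map (fun p => pvFmtPair p)

-- ===== PRECONDITION & SPEC =====
def Spec_visited_houses (any_direction : String) (out : List String) : Prop := out = visited_houses_alt any_direction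
instance (any_direction : String) (out : List String) : Decidable (Spec_visited_houses any_direction out) := by unfold Spec_visited_houses; infer_instance

-- ===== CLAIM (what is proved, stated in full; the proofs are below) =====
def Claim_equal_visited_houses : Prop := ∀ (any_direction : String), Dom_visited_houses any_direction → Spec_visited_houses any_direction (visited_houses any_direction)

-- ===== LEMMAS AND PROOFS =====

-- reference specification: the running-position scan, as plain structural recursion
def pvScanRec (pos : Int × Int) : List (Int × Int) → List (Int × Int)
  | [] => []
  | d :: ds => (pos.1 + d.1, pos.2 + d.2) :: pvScanRec (pos.1 + d.1, pos.2 + d.2) ds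

theorem pvScanRec_shift (ds : List (Int × Int)) : ∀ (p : Int × Int),
    pvScanRec p ds = (pvScanRec (0, 0) ds).map (fun q => (p.1 + q.1, p.2 + q.2)) := by
  induction ds with
  | nil => intro p; simp [pvScanRec]
  | cons d ds ih =>
      intro p
      simp only [pvScanRec, List.map_cons, zero_add]
      congr 1
      rw [ih (p.1 + d.1, p.2 + d.2), ih (d.1, d.2), List.map_map]
      apply List.map_congr_left
      intro q _
      simp only [Function.comp_apply, Prod.mk.injEq]
      constructor <;> ring

theorem pvScanRec_append (a : List (Int × Int)) : ∀ (b : List (Int × Int)) (p : Int × Int),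
    pvScanRec p (a ++ b) = pvScanRec p a ++ pvScanRec ((pvScanRec p a).getLastD p) b := by
  induction a with
  | nil => intro b p; simp [pvScanRec]
  | cons d a ih =>
      intro b p
      simp only [List.cons_append, pvScanRec, ih, List.getLastD_cons]

-- B's divide and conquer computes the scan
theorem pvPositions_eq (n : ℕ) : ∀ (ms : List (Int × Int)), ms.length ≤ n →
    pvPositions ms = pvScanRec (0, 0) ms := by
  induction n with
  | zero =>
      intro ms h
      have : ms = [] := List.length_eq_zero_iff.mp (Nat.le_zero.mp h)
      subst this; simp [pvPositions, pvScanRec]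
  | succ n ih =>
      intro ms h
      rw [pvPositions]
      by_cases h1 : ms.length ≤ 1
      · simp only [h1, if_true]
        match ms, h1 with
        | [], _ => simp [pvScanRec]
        | [d], _ => simp [pvScanRec]
      · simp only [h1, if_false]
        have hlen : 2 ≤ ms.length := by omega
        have htake : (ms.take (ms.length / 2)).length ≤ n := by
          simp only [List.length_take]; omega
        have hdrop : (ms.drop (ms.length / 2)).length ≤ n := by
          simp only [List.length_drop]; omega
        rw [ih _ htake, ih _ hdrop]
        conv_rhs => rw [← List.take_append_drop (ms.length / 2) ms]
        rw [pvScanRec_append]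
        congr 1
        conv_rhs => rw [pvScanRec_shift]

-- A's loop invariant: the zip of the two parallel lists grows by exactly the scan of the filtered deltas
theorem pvAfold_zip (cs : List Char) :
    ∀ (x y : Int) (ns we : List Int), ns.length = we.length →
    let r := cs.foldl
      (fun (st : Int × Int × List Int × List Int) i =>
        let x := st.1; let y := st.2.1; let ns := st.2.2.1; let we := st.2.2.2
        if i = '<' then (x, y - 1, ns ++ [x], we ++ [y - 1])
        else if i = '>' then (x, y + 1, ns ++ [x], we ++ [y + 1])
        else if i = '^' then (x + 1, y, ns ++ [x + 1], we ++ [y])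
        else if i = 'v' then (x - 1, y, ns ++ [x - 1], we ++ [y])
        else st)
      (x, y, ns, we)
    r.2.2.1.length = r.2.2.2.length ∧
      r.2.2.1.zip r.2.2.2 = ns.zip we ++ pvScanRec (x, y) (cs.filterMap pvDeltaOf?) := by
  induction cs with
  | nil => intro x y ns we h; simpa [pvScanRec] using h
  | cons c cs ih =>
      intro x y ns we h
      simp only [List.foldl_cons, List.filterMap_cons]
      by_cases h1 : c = '<'
      · subst h1
        have := ih x (y - 1) (ns ++ [x]) (we ++ [y - 1]) (by simp [h])
        simpa [pvDeltaOf?, pvScanRec, List.zip_append h] using this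
      · by_cases h2 : c = '>'
        · subst h2
          have := ih x (y + 1) (ns ++ [x]) (we ++ [y + 1]) (by simp [h])
          simpa [pvDeltaOf?, pvScanRec, List.zip_append h] using this
        · by_cases h3 : c = '^'
          · subst h3
            have := ih (x + 1) y (ns ++ [x + 1]) (we ++ [y]) (by simp [h])
            simpa [pvDeltaOf?, pvScanRec, List.zip_append h] using this
          · by_cases h4 : c = 'v'
            · subst h4
              have := ih (x - 1) y (ns ++ [x - 1]) (we ++ [y]) (by simp [h])
              simpa [pvDeltaOf?, pvScanRec, List.zip_append h] using this
            · have := ih x y ns we h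
              simpa [pvDeltaOf?, h1, h2, h3, h4] using this

-- ===== VERDICT (by name: the statement is the Claim_ definition above) =====
theorem visited_houses_spec : Claim_equal_visited_houses := by
  intro s _
  show visited_houses s = visited_houses_alt s
  unfold visited_houses visited_houses_alt
  dsimp only
  rw [pvPositions_eq (s.toList.filterMap pvDeltaOf?).length _ le_rfl]
  have := pvAfold_zip s.toList 0 0 [] [] rfl
  rw [this.2]
  simp
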